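-- pv_equiv track=rewrite | github.com/Bobcatsoap/jy-server | cell/RoomType6Calculator.py | compare_sidaier
-- ===== SOURCE A (Python) =====
-- def compare_sidaier(cards1, cards2):
--     # cards1.sort()
--     # cards2.sort()
--     card1_si, card2_si = 0, 0
--     for i in cards1:
--         if cards1.count(i) == 4:
--             card1_si = i
--             break
--
--     for i in cards2:
--         if cards2.count(i) == 4:
--             card2_si = i
--             break
--
--     return card1_si > card2_si
-- ===== SOURCE B (Python) =====
-- def compare_sidaier(cards1, cards2):
--     return _quad_value(cards1) > _quad_value(cards2)
--
--
-- def _quad_value(cards):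
--     # Successively strip all copies of the leading value; the drop in length
--     # is that value's multiplicity, so no counting scan of the full hand is
--     # ever repeated for later duplicates of an already-examined value.
--     while cards:
--         v = cards[0]
--         rest = [x for x in cards if x != v]
--         if len(cards) - len(rest) == 4:
--             return v
--         cards = rest
--     return 0
-- ===== Notes on version B (the rewrite author's own statement) =====
-- stated objective: alternative
-- what changed: Replaces A's scan of every position with a full .count() rescan per element by an iterative partition-and-shrink loop: repeatedly strip all copies of the leading value from a shrinking working list and read its multiplicity off the length drop, visiting each distinct value once.
import Mathlib
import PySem

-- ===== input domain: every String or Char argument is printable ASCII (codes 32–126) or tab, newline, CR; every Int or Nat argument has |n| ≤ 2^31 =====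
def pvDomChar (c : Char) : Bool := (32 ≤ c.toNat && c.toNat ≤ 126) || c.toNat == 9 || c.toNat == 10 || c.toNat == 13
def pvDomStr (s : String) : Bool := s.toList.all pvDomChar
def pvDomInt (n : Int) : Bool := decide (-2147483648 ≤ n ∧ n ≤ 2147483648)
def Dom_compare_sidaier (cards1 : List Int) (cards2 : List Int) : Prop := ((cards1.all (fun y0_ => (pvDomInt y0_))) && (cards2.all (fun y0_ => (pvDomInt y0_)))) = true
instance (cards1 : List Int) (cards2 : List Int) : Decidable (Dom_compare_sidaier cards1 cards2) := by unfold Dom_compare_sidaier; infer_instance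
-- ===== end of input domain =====

-- B replaces A's per-position full .count() rescan by a partition-and-shrink loop over a
-- shrinking working list, reading each multiplicity off a length drop (objective: alternative).

-- ===== PORT A =====
-- the 'for i in cards: if cards.count(i) == 4: card_si = i; break' loop (card_si starts at 0)
def quadLoopA (orig : List Int) : List Int → Int
  | [] => 0
  | i :: rest => if PySem.List.count orig i == 4 then i else quadLoopA orig rest

def compare_sidaier (cards1 : List Int) (cards2 : List Int) : Bool :=
  decide (quadLoopA cards1 cards1 > quadLoopA cards2 cards2)

-- ===== PORT B =====
-- the 'while cards: v = cards[0]; rest = [x for x in cards if x != v]; …' loop of _quad_value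
def quadValueB : List Int → Int
  | [] => 0
  | v :: t =>
    let rest := (v :: t).filter (fun x => x != v)
    if ((v :: t).length : Int) - (rest.length : Int) == 4 then v else quadValueB rest
termination_by cards => cards.length
decreasing_by
  simp only [List.filter_cons, bne_self_eq_false, List.length_cons]
  exact Nat.lt_succ_of_le (List.length_filter_le _ _)

def compare_sidaier_alt (cards1 : List Int) (cards2 : List Int) : Bool :=
  decide (quadValueB cards1 > quadValueB cards2)

-- ===== PRECONDITION & SPEC =====
def Spec_compare_sidaier (cards1 : List Int) (cards2 : List Int) (out : Bool) : Prop := out = compare_sidaier_alt cards1 cards2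
instance (cards1 : List Int) (cards2 : List Int) (out : Bool) : Decidable (Spec_compare_sidaier cards1 cards2 out) := by unfold Spec_compare_sidaier; infer_instance

-- ===== CLAIM (what is proved, stated in full; the proofs are below) =====
def Claim_equal_compare_sidaier : Prop := ∀ (cards1 : List Int) (cards2 : List Int), Dom_compare_sidaier cards1 cards2 → Spec_compare_sidaier cards1 cards2 (compare_sidaier cards1 cards2)

-- ===== LEMMAS AND PROOFS =====

theorem quadLoopA_eq_find (orig l : List Int) :
    quadLoopA orig l = (l.find? (fun i => PySem.List.count orig i == 4)).getD 0 := by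
  induction l with
  | nil => rfl
  | cons x t ih =>
    rw [quadLoopA, List.find?_cons]
    cases h : (PySem.List.count orig x == 4)
    · simp only [h, Bool.false_eq_true, if_false]
      exact ih
    · simp [h]

-- removing all copies of v from l removes exactly (count of v) elements
theorem length_filter_ne (v : Int) (l : List Int) :
    (l.filter (fun x => x != v)).length + List.count v l = l.length := by
  induction l with
  | nil => rfl
  | cons x t ih =>
    by_cases h : x = v
    · subst h; simp [List.filter_cons, List.count_cons, ← ih]; omega
    · simp [List.filter_cons, List.count_cons, h, ih]
      omega

-- counts of values other than v survive the filter
theorem count_filter_ne (v i : Int) (l : List Int) (h : i ≠ v) :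
    List.count i (l.filter (fun x => x != v)) = List.count i l := by
  rw [List.count_filter]
  simp [h]

-- find? may be pushed through the filter once the dropped value fails the predicate
theorem find?_filter_of_fail (p : Int → Bool) (v : Int) (hv : ∀ x, p x = true → x ≠ v) :
    ∀ l : List Int, l.find? p = (l.filter (fun x => x != v)).find? p := by
  intro l
  induction l with
  | nil => rfl
  | cons x t ih =>
    by_cases hx : x = v
    · subst hx
      have hpx : p x = false := by
        by_contra h
        exact (hv x (by simpa using h)) rfl
      simp [List.filter_cons, List.find?_cons, hpx, ih]
    · simp only [List.filter_cons]
      have : (x != v) = true := by simpa using hx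
      rw [this]
      simp only [if_pos rfl, List.find?_cons]
      by_cases hpx : p x = true
      · simp [hpx]
      · simp only [Bool.not_eq_true] at hpx
        simp [hpx, ih]

theorem find?_congr_mem (p q : Int → Bool) (l : List Int)
    (h : ∀ x ∈ l, p x = q x) : l.find? p = l.find? q := by
  induction l with
  | nil => rfl
  | cons x t ih =>
    rw [List.find?_cons, List.find?_cons, h x (by simp)]
    cases hq : q x
    · simp only [Bool.false_eq_true, if_false]
      exact ih (fun y hy => h y (by simp [hy]))
    · simp

-- the two counting predicates agree pointwise
theorem pred_eq (l : List Int) :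
    (fun i => PySem.List.count l i == 4) = (fun i => decide (List.count i l = 4)) := by
  funext i
  by_cases h : List.count i l = 4 <;> simp [PySem.List.count, h]

theorem quadValueB_eq_find (l : List Int) :
    quadValueB l = (l.find? (fun i => PySem.List.count l i == 4)).getD 0 := by
  induction hn : l.length using Nat.strong_induction_on generalizing l with
  | _ n ih =>
    cases l with
    | nil => simp [quadValueB]
    | cons v t =>
      rw [quadValueB, pred_eq]
      set rest := (v :: t).filter (fun x => x != v) with hrest
      have hlen : rest.length + List.count v (v :: t) = (v :: t).length :=
        length_filter_ne v (v :: t)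
      by_cases hc : List.count v (v :: t) = 4
      · have hcond : (((v :: t).length : Int) - (rest.length : Int) == 4) = true := by
          simp only [beq_iff_eq]; omega
        rw [hcond]
        simp [List.find?_cons, hc]
      · have hcond : (((v :: t).length : Int) - (rest.length : Int) == 4) = false := by
          simp only [beq_eq_false_iff_ne, ne_eq]; omega
        rw [hcond]
        simp only [Bool.false_eq_true, if_false]
        have hrl : rest.length < n := by
          rw [← hn, ← hlen]
          have hcount : 0 < List.count v (v :: t) := by simp [List.count_cons]
          omega
        rw [ih rest.length hrl rest rfl, pred_eq]
        have hv : ∀ x, decide (List.count x (v :: t) = 4) = true → x ≠ v := by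
          intro x hx hxv
          subst hxv
          exact hc (by simpa using hx)
        rw [List.find?_cons]
        have hpv : decide (List.count v (v :: t) = 4) = false := by simpa using hc
        rw [hpv]
        simp only [Bool.false_eq_true, if_false]
        rw [find?_filter_of_fail _ v hv t]
        have hfeq : (t.filter (fun x => x != v)) = rest := by
          rw [hrest]; simp [List.filter_cons]
        rw [hfeq]
        congr 1
        apply find?_congr_mem
        intro x hx
        have hxv : x ≠ v := by
          have := List.of_mem_filter (p := fun x => x != v) hx
          simpa using this
        rw [hrest, count_filter_ne v x (v :: t) hxv]

-- ===== VERDICT (by name: the statement is the Claim_ definition above) =====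
theorem compare_sidaier_spec : Claim_equal_compare_sidaier := by
  intro cards1 cards2 _
  unfold Spec_compare_sidaier compare_sidaier compare_sidaier_alt
  rw [quadValueB_eq_find, quadValueB_eq_find, quadLoopA_eq_find, quadLoopA_eq_find]
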